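-- pv_equiv track=rewrite | github.com/vbaddi/efficient-transformers | QEfficient/base/onnx_transforms.py | _path_to_hierarchical
-- ===== SOURCE A (Python) =====
-- def _path_to_hierarchical(dot_path: str) -> str:
--     """Convert dot notation to hierarchical path format."""
--     parts = dot_path.split(".")
--     hier_parts = []
--
--     for p in parts:
--         if p.isdigit() and hier_parts:
--             hier_parts[-1] = f"{hier_parts[-1]}.{p}"
--         else:
--             hier_parts.append(p)
--
--     return "/".join(hier_parts)
-- ===== SOURCE B (Python) =====
-- def _path_to_hierarchical(dot_path: str) -> str:
--     """Convert dot notation to hierarchical path format."""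
--     # Right-to-left character scan: no split, no parts list. A '.' stays a '.'
--     # exactly when the segment to its right (up to the next '.') is a nonempty
--     # run of digits; otherwise it becomes '/'. Other characters pass through.
--     out = []
--     all_digits = True  # segment right of the cursor (up to the next '.') is all digits
--     nonempty = False   # ... and contains at least one character
--     for c in reversed(dot_path):
--         if c == ".":
--             out.append("." if nonempty and all_digits else "/")
--             all_digits = True
--             nonempty = False
--         else:
--             out.append(c)
--             all_digits = all_digits and c.isdigit()
--             nonempty = True
--     return "".join(reversed(out))
-- ===== Notes on version B (the rewrite author's own statement) =====
-- stated objective: alternative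
-- what changed: Replaces split-into-parts plus list grouping (append / rewrite-last / join) with a single right-to-left character-level state machine: no split and no parts list at all; each '.' is kept or turned into '/' based on a digit-run flag for the segment to its right.
import Mathlib
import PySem

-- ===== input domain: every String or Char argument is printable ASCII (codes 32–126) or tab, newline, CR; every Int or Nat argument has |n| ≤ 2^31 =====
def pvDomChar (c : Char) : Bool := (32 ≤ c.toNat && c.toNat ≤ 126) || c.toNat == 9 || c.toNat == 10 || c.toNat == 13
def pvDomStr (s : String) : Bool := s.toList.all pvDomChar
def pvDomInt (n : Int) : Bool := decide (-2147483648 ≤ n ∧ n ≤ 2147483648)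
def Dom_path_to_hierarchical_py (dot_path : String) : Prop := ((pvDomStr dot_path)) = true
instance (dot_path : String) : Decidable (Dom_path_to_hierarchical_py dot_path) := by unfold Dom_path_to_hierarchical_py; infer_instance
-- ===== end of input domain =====

-- B replaces A's split-into-parts + mutable-list grouping with a single right-to-left
-- character-level state machine (no split, no parts list) — objective: alternative.

-- ===== PORT A =====
-- the for-loop over parts with the mutable hier_parts list, as structural recursion on parts
def pvALoop (hier_parts : List (List Char)) (parts : List (List Char)) : List (List Char) :=
  match parts with
  | [] => hier_parts
  | p :: rest =>
      if PySem.Chars.strIsdigit p && !hier_parts.isEmpty then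
        -- hier_parts[-1] = f"{hier_parts[-1]}.{p}"
        pvALoop (hier_parts.dropLast ++ [hier_parts.getLastD [] ++ '.' :: p]) rest
      else
        pvALoop (hier_parts ++ [p]) rest

def path_to_hierarchical_py (dot_path : String) : String :=
  -- parts = dot_path.split(".")  (PySem.Chars.splitOn: exact split for a nonempty separator)
  String.ofList (PySem.Chars.join ['/'] (pvALoop [] (PySem.Chars.splitOn dot_path.toList ['.'])))

-- ===== PORT B =====
-- one step of Source B's loop body over reversed(dot_path): state = (out, all_digits, nonempty)
def pvBStep (st : List Char × Bool × Bool) (c : Char) : List Char × Bool × Bool :=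
  match st with
  | (out, all_digits, nonempty) =>
      if c = '.' then
        (out ++ [if nonempty && all_digits then '.' else '/'], true, false)
      else
        (out ++ [c], all_digits && PySem.Chars.isdigit c, true)

def path_to_hierarchical_py_alt (dot_path : String) : String :=
  -- for c in reversed(dot_path): …   then "".join(reversed(out))
  String.ofList ((dot_path.toList.reverse.foldl pvBStep ([], true, false)).1.reverse)

-- ===== PRECONDITION & SPEC =====
def Spec_path_to_hierarchical_py (dot_path : String) (out : String) : Prop := out = path_to_hierarchical_py_alt dot_path
instance (dot_path : String) (out : String) : Decidable (Spec_path_to_hierarchical_py dot_path out) := by unfold Spec_path_to_hierarchical_py; infer_instance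

-- ===== CLAIM (what is proved, stated in full; the proofs are below) =====
def Claim_equal_path_to_hierarchical_py : Prop := ∀ (dot_path : String), Dom_path_to_hierarchical_py dot_path → Spec_path_to_hierarchical_py dot_path (path_to_hierarchical_py dot_path)

-- ===== LEMMAS AND PROOFS =====

-- simple structural characterisation of dot_path.split(".") on the char list
def pvSp (cs : List Char) : List (List Char) :=
  match cs with
  | [] => [[]]
  | c :: rest =>
      if c = '.' then [] :: pvSp rest
      else
        match pvSp rest with
        | [] => [[c]]          -- unreachable: pvSp is never []
        | h :: t => (c :: h) :: t

theorem pvSp_ne_nil (cs : List Char) : pvSp cs ≠ [] := by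
  cases cs with
  | nil => simp [pvSp]
  | cons c rest =>
      simp only [pvSp]
      split_ifs with h
      · simp
      · cases pvSp rest <;> simp

theorem pvSplitOn_go_eq (fuel : Nat) :
    ∀ (l cur : List Char) (acc : List (List Char)), l.length < fuel →
      PySem.Chars.splitOn.go ['.'] fuel l cur acc
        = acc.reverse ++ (pvSp l).modifyHead (fun h => cur.reverse ++ h) := by
  induction fuel with
  | zero => intro l cur acc h; omega
  | succ f ih =>
      intro l cur acc h
      cases l with
      | nil =>
          simp [PySem.Chars.splitOn.go, pvSp]
      | cons c rest =>
          by_cases hc : c = '.'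
          · subst hc
            have hpre : List.isPrefixOf ['.'] ('.' :: rest) = true := by
              simp [List.isPrefixOf]
            rw [PySem.Chars.splitOn.go, if_pos hpre]
            simp only [List.length_singleton, List.drop_succ_cons, List.drop_zero]
            rw [ih rest [] (cur.reverse :: acc) (by simp at h ⊢; omega)]
            simp only [pvSp, List.reverse_cons, List.reverse_nil,
              List.nil_append, List.append_assoc, List.singleton_append]
            cases pvSp rest <;> simp
          · have hpre : List.isPrefixOf ['.'] (c :: rest) = false := by
              simp [List.isPrefixOf]
              intro hcc; exact hc hcc.symm
            rw [PySem.Chars.splitOn.go, if_neg (by simp [hpre])]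
            rw [ih rest (c :: cur) acc (by simp at h ⊢; omega)]
            simp only [pvSp, if_neg hc]
            obtain ⟨hh, ht, hsp⟩ : ∃ hh ht, pvSp rest = hh :: ht := by
              cases hsp : pvSp rest with
              | nil => exact absurd hsp (pvSp_ne_nil rest)
              | cons a b => exact ⟨a, b, rfl⟩
            rw [hsp]
            simp

theorem pvSplitOn_eq (cs : List Char) : PySem.Chars.splitOn cs ['.'] = pvSp cs := by
  show PySem.Chars.splitOn.go ['.'] (cs.length + 1) cs [] [] = pvSp cs
  rw [pvSplitOn_go_eq (cs.length + 1) cs [] [] (by omega)]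
  cases hsp : pvSp cs <;> simp

-- the hierarchical result, as a function of the parts list
def pvHierTail (t : List (List Char)) : List Char :=
  t.flatMap (fun p => (if PySem.Chars.strIsdigit p then ['.'] else ['/']) ++ p)

def pvHier (parts : List (List Char)) : List Char :=
  match parts with
  | [] => []
  | h :: t => h ++ pvHierTail t

theorem pvJoinCons (sep a : List Char) (l : List (List Char)) (h : l ≠ []) :
    PySem.Chars.join sep (a :: l) = a ++ sep ++ PySem.Chars.join sep l := by
  cases l with
  | nil => exact absurd rfl h
  | cons b rest => exact PySem.Chars.join_cons_cons sep a b rest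

theorem pvJoinAppend (sep p : List Char) (acc : List (List Char)) (h : acc ≠ []) :
    PySem.Chars.join sep (acc ++ [p]) = PySem.Chars.join sep acc ++ sep ++ p := by
  induction acc with
  | nil => exact absurd rfl h
  | cons a rest ih =>
      cases rest with
      | nil => simp [PySem.Chars.join_cons_cons, PySem.Chars.join_singleton]
      | cons b r =>
          rw [List.cons_append, pvJoinCons sep a ((b :: r) ++ [p]) (by simp),
              ih (by simp), pvJoinCons sep a (b :: r) (by simp)]
          simp [List.append_assoc]

theorem pvJoinLast (sep x : List Char) (acc : List (List Char)) (h : acc ≠ []) :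
    PySem.Chars.join sep (acc.dropLast ++ [acc.getLastD [] ++ x])
      = PySem.Chars.join sep acc ++ x := by
  induction acc with
  | nil => exact absurd rfl h
  | cons a rest ih =>
      cases rest with
      | nil => simp [PySem.Chars.join_singleton]
      | cons b r =>
          have hdl : (a :: b :: r).dropLast = a :: (b :: r).dropLast := by simp
          have hgl : (a :: b :: r).getLastD [] = (b :: r).getLastD [] := by simp
          rw [hdl, hgl, List.cons_append,
              pvJoinCons sep a ((b :: r).dropLast ++ [(b :: r).getLastD [] ++ x]) (by simp),
              ih (by simp), pvJoinCons sep a (b :: r) (by simp)]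
          simp [List.append_assoc]

-- A's loop, started from a nonempty accumulator, appends pvHierTail to the join
theorem pvALoopEq (ps : List (List Char)) :
    ∀ (acc : List (List Char)), acc ≠ [] →
      PySem.Chars.join ['/'] (pvALoop acc ps)
        = PySem.Chars.join ['/'] acc ++ pvHierTail ps := by
  induction ps with
  | nil => intro acc _; simp [pvALoop, pvHierTail]
  | cons p rest ih =>
      intro acc hacc
      have hne : acc.isEmpty = false := by simp [hacc]
      by_cases hd : PySem.Chars.strIsdigit p = true
      · rw [pvALoop, if_pos (by simp [hd, hne]),
            ih (acc.dropLast ++ [acc.getLastD [] ++ '.' :: p]) (by simp),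
            pvJoinLast ['/'] ('.' :: p) acc hacc]
        simp [pvHierTail, hd, List.append_assoc]
      · rw [pvALoop, if_neg (by simp [hd]),
            ih (acc ++ [p]) (by simp),
            pvJoinAppend ['/'] p acc hacc]
        simp [pvHierTail, hd, List.append_assoc]

theorem pvAEqHier (cs : List Char) :
    PySem.Chars.join ['/'] (pvALoop [] (pvSp cs)) = pvHier (pvSp cs) := by
  obtain ⟨h, t, hsp⟩ : ∃ h t, pvSp cs = h :: t := by
    cases hsp : pvSp cs with
    | nil => exact absurd hsp (pvSp_ne_nil cs)
    | cons a b => exact ⟨a, b, rfl⟩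
  rw [hsp]
  have h0 : pvALoop [] (h :: t) = pvALoop [h] t := by simp [pvALoop]
  rw [h0, pvALoopEq t [h] (by simp), PySem.Chars.join_singleton, pvHier]

-- B's scan invariant: the foldr over the chars computes (reversed result, digit-run state of the head part)
theorem pvBInv (cs : List Char) :
    cs.foldr (fun c st => pvBStep st c) ([], true, false)
      = ((pvHier (pvSp cs)).reverse,
         (pvSp cs).headI.all PySem.Chars.isdigit,
         !(pvSp cs).headI.isEmpty) := by
  induction cs with
  | nil => simp [pvSp, pvHier, pvHierTail]
  | cons c rest ih =>
      rw [List.foldr_cons, ih]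
      by_cases hc : c = '.'
      · subst hc
        obtain ⟨h, t, hsp⟩ : ∃ h t, pvSp rest = h :: t := by
          cases hsp : pvSp rest with
          | nil => exact absurd hsp (pvSp_ne_nil rest)
          | cons a b => exact ⟨a, b, rfl⟩
        have hsp' : pvSp ('.' :: rest) = [] :: h :: t := by simp [pvSp, hsp]
        rw [hsp, hsp']
        by_cases hd : PySem.Chars.strIsdigit h = true
        · have hsep : (!h.isEmpty && h.all PySem.Chars.isdigit) = true := by
            simpa [PySem.Chars.strIsdigit] using hd
          simp [pvBStep, pvHier, pvHierTail, hsep, hd, List.append_assoc]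
        · have hsep : (!h.isEmpty && h.all PySem.Chars.isdigit) = false := by
            have := hd; simp [PySem.Chars.strIsdigit] at this ⊢
            intro hne; exact this hne
          simp [pvBStep, pvHier, pvHierTail, hsep, hd, List.append_assoc]
      · obtain ⟨h, t, hsp⟩ : ∃ h t, pvSp rest = h :: t := by
          cases hsp : pvSp rest with
          | nil => exact absurd hsp (pvSp_ne_nil rest)
          | cons a b => exact ⟨a, b, rfl⟩
        have hsp' : pvSp (c :: rest) = (c :: h) :: t := by simp [pvSp, hc, hsp]
        rw [hsp, hsp']
        simp [pvBStep, hc, pvHier, Bool.and_comm]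

-- ===== VERDICT (by name: the statement is the Claim_ definition above) =====
theorem path_to_hierarchical_py_spec : Claim_equal_path_to_hierarchical_py := by
  intro dot_path _
  unfold Spec_path_to_hierarchical_py path_to_hierarchical_py path_to_hierarchical_py_alt
  rw [List.foldl_reverse]
  have hb := pvBInv dot_path.toList
  rw [hb]
  rw [pvSplitOn_eq, pvAEqHier]
  simp
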